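-- pv_equiv track=rewrite | github.com/devsacti/ProblemSolving | PS-Pool/PS-Daily-Record/220706/programmers/폰케몬.py | solution
-- ===== SOURCE A (Python) =====
-- from collections import defaultdict
--
-- def solution(nums):
--     answer = 0
--     len_nums=len(nums)
--     # mon[num] is count of monster
--     mon_cnt=defaultdict(int)
--
--     for num in nums:
--         mon_cnt[num]+=1
--
--     kind_mon=list(mon_cnt)
--
--     cnt_kind_mon=len(kind_mon)
--
--     if cnt_kind_mon >= len_nums//2:
--         answer=len_nums//2
--     else:
--         answer=cnt_kind_mon
--
--     return answer
-- ===== SOURCE B (Python) =====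
-- def solution(nums):
--     s = sorted(nums)
--     distinct = 0
--     prev = None
--     for x in s:
--         if prev is None or x != prev:
--             distinct += 1
--         prev = x
--     half = len(nums) // 2
--     return distinct if distinct < half else half
-- ===== Notes on version B (the rewrite author's own statement) =====
-- stated objective: alternative
-- what changed: Replaces the hash-based counting dict (build Counter, count its keys) with a sort-then-adjacent-scan: sort the list, count positions where the value changes, then take min with len//2.
import Mathlib
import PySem

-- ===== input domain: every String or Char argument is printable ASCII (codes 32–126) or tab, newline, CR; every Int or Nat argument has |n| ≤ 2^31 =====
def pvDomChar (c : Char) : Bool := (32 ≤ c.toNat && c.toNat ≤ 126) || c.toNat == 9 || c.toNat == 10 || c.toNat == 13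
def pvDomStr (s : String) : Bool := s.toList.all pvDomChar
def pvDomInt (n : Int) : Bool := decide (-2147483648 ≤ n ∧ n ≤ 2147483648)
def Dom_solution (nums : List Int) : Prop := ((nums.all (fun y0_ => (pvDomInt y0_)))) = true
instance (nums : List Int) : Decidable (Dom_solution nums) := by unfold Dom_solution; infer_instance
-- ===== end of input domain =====

-- B replaces A's counting-dict pass by a sort-then-adjacent-scan for the distinct count (alternative decomposition, same results).

-- ===== PORT A =====
-- locals of A inlined: mon_cnt is the counting fold, kind_mon its keys, cnt_kind_mon their number
def solution (nums : List Int) : Int :=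
  if ((nums.foldl (fun d num => d.modify num 0 (· + 1)) (PySem.Dict.empty : PySem.Dict Int Int)).keys.length : Int)
       ≥ PySem.Int.floordiv (nums.length : Int) 2
  then PySem.Int.floordiv (nums.length : Int) 2
  else ((nums.foldl (fun d num => d.modify num 0 (· + 1)) (PySem.Dict.empty : PySem.Dict Int Int)).keys.length : Int)

-- ===== PORT B =====
-- step of B's loop: state = (prev, distinct)
def solAltStep (acc : Option Int × Int) (x : Int) : Option Int × Int :=
  match acc with
  | (none, d) => (some x, d + 1)
  | (some p, d) => (some x, if x ≠ p then d + 1 else d)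

-- locals of B inlined: s is the sorted copy, distinct the scan result, half = len(nums)//2
def solution_alt (nums : List Int) : Int :=
  if ((PySem.List.sorted nums (fun x => x) false).foldl solAltStep (none, 0)).2
       < PySem.Int.floordiv (nums.length : Int) 2
  then ((PySem.List.sorted nums (fun x => x) false).foldl solAltStep (none, 0)).2
  else PySem.Int.floordiv (nums.length : Int) 2

-- ===== PRECONDITION & SPEC =====
def Spec_solution (nums : List Int) (out : Int) : Prop := out = solution_alt nums
instance (nums : List Int) (out : Int) : Decidable (Spec_solution nums out) := by unfold Spec_solution; infer_instance

-- ===== CLAIM (what is proved, stated in full; the proofs are below) =====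
def Claim_equal_solution : Prop := ∀ (nums : List Int), Dom_solution nums → Spec_solution nums (solution nums)

-- ===== LEMMAS AND PROOFS =====

-- B's scan over a sorted tail counts the elements strictly above the previous value
theorem solAlt_loop_count (l : List Int) (hs : l.Pairwise (· ≤ ·)) :
    ∀ p d, (∀ x ∈ l, p ≤ x) →
      (l.foldl solAltStep (some p, d)).2 = d + ((l.toFinset.filter (fun y => p < y)).card : Int) := by
  induction l with
  | nil => intro p d _; simp
  | cons x t ih =>
    intro p d hlb
    have hpx : p ≤ x := hlb x (by simp)
    have ht : t.Pairwise (· ≤ ·) := hs.of_cons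
    have hxt : ∀ y ∈ t, x ≤ y := fun y hy => (List.pairwise_cons.mp hs).1 y hy
    by_cases hxp : x = p
    · subst hxp
      simp only [List.foldl_cons, solAltStep, ne_eq, not_true_eq_false, if_false]
      rw [ih ht x d hxt]
      congr 2
      rw [List.toFinset_cons, Finset.filter_insert]
      simp
    · have hpx' : p < x := lt_of_le_of_ne hpx (fun h => hxp h.symm)
      simp only [List.foldl_cons, solAltStep, ne_eq, hxp, not_false_eq_true, if_true]
      rw [ih ht x (d + 1) hxt]
      have h1 : t.toFinset.filter (fun y => x < y) = t.toFinset.erase x := by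
        apply Finset.ext; intro y
        simp only [Finset.mem_filter, Finset.mem_erase, List.mem_toFinset]
        constructor
        · rintro ⟨hy, hlt⟩; exact ⟨ne_of_gt hlt, hy⟩
        · rintro ⟨hne, hy⟩; exact ⟨hy, lt_of_le_of_ne (hxt y hy) (Ne.symm hne)⟩
      have h2 : (x :: t).toFinset.filter (fun y => p < y) = insert x t.toFinset := by
        apply Finset.ext; intro y
        simp only [List.toFinset_cons, Finset.mem_filter, Finset.mem_insert, List.mem_toFinset]
        constructor
        · rintro ⟨hy, _⟩; exact hy
        · rintro (rfl | hy)
          · exact ⟨Or.inl rfl, hpx'⟩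
          · exact ⟨Or.inr hy, lt_of_lt_of_le hpx' (hxt y hy)⟩
      rw [h1, h2]
      by_cases hmem : x ∈ t.toFinset
      · rw [Finset.card_erase_of_mem hmem, Finset.insert_eq_self.mpr hmem]
        have hpos : 0 < t.toFinset.card := Finset.card_pos.mpr ⟨x, hmem⟩
        push_cast [Nat.cast_sub (by omega : 1 ≤ t.toFinset.card)]
        ring
      · rw [Finset.erase_eq_of_notMem hmem, Finset.card_insert_of_notMem hmem]
        push_cast; ring

-- B's whole scan over a sorted list computes the number of distinct elements
theorem solAlt_distinct (l : List Int) (hs : l.Pairwise (· ≤ ·)) :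
    (l.foldl solAltStep (none, 0)).2 = (l.toFinset.card : Int) := by
  cases l with
  | nil => simp
  | cons x t =>
    have ht : t.Pairwise (· ≤ ·) := hs.of_cons
    have hxt : ∀ y ∈ t, x ≤ y := fun y hy => (List.pairwise_cons.mp hs).1 y hy
    simp only [List.foldl_cons, solAltStep]
    rw [solAlt_loop_count t ht x (0 + 1) hxt]
    have h1 : t.toFinset.filter (fun y => x < y) = t.toFinset.erase x := by
      apply Finset.ext; intro y
      simp only [Finset.mem_filter, Finset.mem_erase, List.mem_toFinset]
      constructor
      · rintro ⟨hy, hlt⟩; exact ⟨ne_of_gt hlt, hy⟩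
      · rintro ⟨hne, hy⟩; exact ⟨hy, lt_of_le_of_ne (hxt y hy) (Ne.symm hne)⟩
    rw [h1, List.toFinset_cons]
    by_cases hmem : x ∈ t.toFinset
    · rw [Finset.card_erase_of_mem hmem, Finset.insert_eq_self.mpr hmem]
      have hpos : 0 < t.toFinset.card := Finset.card_pos.mpr ⟨x, hmem⟩
      push_cast [Nat.cast_sub (by omega : 1 ≤ t.toFinset.card)]
      ring
    · rw [Finset.erase_eq_of_notMem hmem, Finset.card_insert_of_notMem hmem]
      push_cast; ring

-- A's key count is the number of distinct elements
theorem solA_keys_card (nums : List Int) :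
    ((nums.foldl (fun d num => d.modify num 0 (· + 1)) (PySem.Dict.empty : PySem.Dict Int Int)).keys.length : Int)
      = (nums.toFinset.card : Int) := by
  have h : (nums.foldl (fun d num => d.modify num 0 (· + 1)) (PySem.Dict.empty : PySem.Dict Int Int)).keys
      = PySem.Set.ofList nums := by
    have h := PySem.Dict.keys_counter (κ := Int) nums
    rw [PySem.Dict.counter_eq_foldl] at h
    exact h
  rw [h]
  have hnd : (PySem.Set.ofList nums).Nodup := PySem.Set.nodup_ofList nums
  have hfs : (PySem.Set.ofList nums).toFinset = nums.toFinset := by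
    apply Finset.ext; intro y
    simp [List.mem_toFinset, PySem.Set.mem_ofList]
  rw [← hfs, List.toFinset_card_of_nodup hnd]

-- ===== VERDICT (by name: the statement is the Claim_ definition above) =====
theorem solution_spec : Claim_equal_solution := by
  intro nums _
  unfold Spec_solution solution solution_alt
  have hperm : (PySem.List.sorted nums (fun x => x) false).Perm nums :=
    PySem.List.sorted_perm nums (fun x => x) false
  have hsorted : (PySem.List.sorted nums (fun x => x) false).Pairwise (· ≤ ·) :=
    PySem.List.sorted_pairwise nums (fun x => x)
  have hdist := solAlt_distinct _ hsorted
  rw [List.toFinset_eq_of_perm _ _ hperm] at hdist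
  rw [hdist, solA_keys_card nums]
  set c : Int := (nums.toFinset.card : Int)
  set h2 : Int := PySem.Int.floordiv (nums.length : Int) 2
  by_cases hlt : c < h2
  · rw [if_neg (by omega), if_pos hlt]
  · rw [if_pos (by omega), if_neg hlt]
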